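-- pv_equiv track=rewrite | github.com/kalv25/districtdrift | pipeline/precinct.py | detect_vote_columns
-- ===== SOURCE A (Python) =====
-- CYCLE_TO_ELEC_YEARS: dict[int, list[str]] = {
--     2012: ["12", "14", "16"],
--     2022: ["22", "20"],
-- }
--
-- def _find_vote_columns(
--     columns: list[str],
--     elec_years: list[str],
--     offices: list[str],
--     party: str,
-- ) -> list[str]:
--     """Find VEST vote columns for the given party and office preferences.
--
--     Returns the first matching set (highest-priority year × office combo).
--     """
--     for yr in elec_years:
--         for office in offices:
--             prefix = f"G{yr}{office}{party}"
--             matches = [c for c in columns if c.upper().startswith(prefix.upper())]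
--             if matches:
--                 return matches
--     return []
--
-- def detect_vote_columns(
--     columns: list[str],
--     cycle_year: int,
-- ) -> tuple[list[str], list[str], str]:
--     """Return (d_cols, r_cols, source_label) for the best available office.
--
--     Priority: US House → Governor → Senate → President
--     Falls back through election years within the cycle.
--     """
--     elec_years = CYCLE_TO_ELEC_YEARS.get(cycle_year, ["22"])
--     offices = ["USH", "GOV", "USS", "PRES"]
--
--     for yr in elec_years:
--         for office in offices:
--             d_cols = _find_vote_columns(columns, [yr], [office], "D")
--             r_cols = _find_vote_columns(columns, [yr], [office], "R")
--             if d_cols and r_cols: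
--                 label = f"20{yr} {office}"
--                 return d_cols, r_cols, label
--
--     return [], [], "unknown"
-- ===== SOURCE B (Python) =====
-- CYCLE_TO_ELEC_YEARS: dict[int, list[str]] = {
--     2012: ["12", "14", "16"],
--     2022: ["22", "20"],
-- }
--
-- _OFFICES = ["USH", "GOV", "USS", "PRES"]
--
--
-- def _parse_key(col: str):
--     """Parse an upper-cased column name into its (year, office, party) key.
--
--     A column is keyed iff it looks like G<yy><OFFICE><party>...; otherwise None.
--     """
--     cu = col.upper()
--     if cu[:1] != "G":
--         return None
--     for office in _OFFICES:
--         k = 3 + len(office)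
--         if cu[3:k] == office:
--             return (cu[1:3], office, cu[k:k + 1])
--     return None
--
--
-- def detect_vote_columns(columns, cycle_year):
--     elec_years = CYCLE_TO_ELEC_YEARS.get(cycle_year, ["22"])
--     keyed = [(k, c) for c in columns for k in [_parse_key(c)] if k is not None]
--     index: dict = {}
--     for k, c in keyed:
--         index.setdefault(k, []).append(c)
--     for yr in elec_years:
--         for office in _OFFICES:
--             d_cols = index.get((yr, office, "D"), [])
--             r_cols = index.get((yr, office, "R"), [])
--             if d_cols and r_cols:
--                 return d_cols, r_cols, f"20{yr} {office}"
--     return [], [], "unknown"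
-- ===== Notes on version B (the rewrite author's own statement) =====
-- stated objective: faster
-- what changed: Instead of re-scanning the column list up to 24 times with prefix tests (once per year/office/party priority combo), B makes a single parsing pass that groups every column into a dict keyed by its (year, office, party) triple, then answers each priority combo with one dict lookup.
import Mathlib
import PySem

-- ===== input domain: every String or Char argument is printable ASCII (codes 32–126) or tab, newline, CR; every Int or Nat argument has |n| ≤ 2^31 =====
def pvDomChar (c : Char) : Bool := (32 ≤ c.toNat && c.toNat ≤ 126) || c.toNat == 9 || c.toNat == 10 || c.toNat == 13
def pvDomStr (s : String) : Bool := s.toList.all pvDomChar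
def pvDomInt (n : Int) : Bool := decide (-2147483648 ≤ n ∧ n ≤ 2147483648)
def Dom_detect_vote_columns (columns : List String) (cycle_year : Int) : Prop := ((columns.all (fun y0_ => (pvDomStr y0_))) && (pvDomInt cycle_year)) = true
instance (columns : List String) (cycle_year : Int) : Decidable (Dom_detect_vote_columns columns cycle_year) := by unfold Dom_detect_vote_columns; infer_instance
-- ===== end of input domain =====

-- B replaces A's 24 repeated prefix-scans of the column list by one parsing pass that
-- groups columns into a dict keyed by (year, office, party), then cheap dict lookups
-- in the same priority order (objective: faster, one pass over the columns).

-- ===== PORT A =====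
def CYCLE_TO_ELEC_YEARS : PySem.Dict Int (List String) :=
  PySem.Dict.ofList [(2012, ["12", "14", "16"]), (2022, ["22", "20"])]

-- inner 'for office in offices' loop of _find_vote_columns (early return = Option)
def pvFvInner (columns : List String) (yr : String) (party : String) : List String → Option (List String)
  | [] => none
  | office :: rest =>
      let prefix_ := PySem.Str.join "" ["G", yr, office, party]
      let ms := columns.filter (fun c => PySem.Str.startswith (PySem.Str.upper c) (PySem.Str.upper prefix_))
      if ms ≠ [] then some ms else pvFvInner columns yr party rest

-- outer 'for yr in elec_years' loop of _find_vote_columns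
def pvFvOuter (columns : List String) (offices : List String) (party : String) : List String → List String
  | [] => []
  | yr :: ys =>
      match pvFvInner columns yr party offices with
      | some ms => ms
      | none => pvFvOuter columns offices party ys

def find_vote_columns (columns : List String) (elec_years : List String) (offices : List String) (party : String) : List String :=
  pvFvOuter columns offices party elec_years

-- inner 'for office in offices' loop of detect_vote_columns
def pvDvInner (columns : List String) (yr : String) : List String → Option (List String × List String × String)
  | [] => none
  | office :: rest =>
      let d_cols := find_vote_columns columns [yr] [office] "D"
      let r_cols := find_vote_columns columns [yr] [office] "R"
      if d_cols ≠ [] ∧ r_cols ≠ [] then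
        some (d_cols, r_cols, PySem.Str.join "" ["20", yr, " ", office])
      else pvDvInner columns yr rest

-- outer 'for yr in elec_years' loop of detect_vote_columns
def pvDvOuter (columns : List String) (offices : List String) : List String → List String × List String × String
  | [] => ([], [], "unknown")
  | yr :: ys =>
      match pvDvInner columns yr offices with
      | some r => r
      | none => pvDvOuter columns offices ys

def detect_vote_columns (columns : List String) (cycle_year : Int) : List String × List String × String :=
  let elec_years := CYCLE_TO_ELEC_YEARS.getD cycle_year ["22"]
  let offices := ["USH", "GOV", "USS", "PRES"]
  pvDvOuter columns offices elec_years

-- ===== PORT B =====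
def pvOffices : List String := ["USH", "GOV", "USS", "PRES"]

-- the 'for office in _OFFICES' loop of _parse_key
def pvParseOffice (cu : String) : List String → Option (String × String × String)
  | [] => none
  | office :: rest =>
      let k := 3 + PySem.Str.len office
      if PySem.Str.slice cu (some 3) (some k) = office then
        some (PySem.Str.slice cu (some 1) (some 3), office, PySem.Str.slice cu (some k) (some (k + 1)))
      else pvParseOffice cu rest

def pvParseKey (col : String) : Option (String × String × String) :=
  let cu := PySem.Str.upper col
  if PySem.Str.slice cu none (some 1) ≠ "G" then none
  else pvParseOffice cu pvOffices

-- keyed = [(k, c) …]; index built by setdefault(k, []).append(c)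
def pvBuildIndex (columns : List String) : PySem.Dict (String × String × String) (List String) :=
  let keyed := columns.filterMap (fun c => (pvParseKey c).map (fun k => (k, c)))
  keyed.foldl (fun d p => d.modify p.1 [] (fun l => l ++ [p.2])) PySem.Dict.empty

-- B's 'for office in _OFFICES' lookup loop
def pvDvbInner (idx : PySem.Dict (String × String × String) (List String)) (yr : String) :
    List String → Option (List String × List String × String)
  | [] => none
  | office :: rest =>
      let d_cols := idx.getD (yr, office, "D") []
      let r_cols := idx.getD (yr, office, "R") []
      if d_cols ≠ [] ∧ r_cols ≠ [] then
        some (d_cols, r_cols, PySem.Str.join "" ["20", yr, " ", office])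
      else pvDvbInner idx yr rest

-- B's 'for yr in elec_years' lookup loop
def pvDvbOuter (idx : PySem.Dict (String × String × String) (List String)) :
    List String → List String × List String × String
  | [] => ([], [], "unknown")
  | yr :: ys =>
      match pvDvbInner idx yr pvOffices with
      | some r => r
      | none => pvDvbOuter idx ys

def detect_vote_columns_alt (columns : List String) (cycle_year : Int) : List String × List String × String :=
  let elec_years := CYCLE_TO_ELEC_YEARS.getD cycle_year ["22"]
  pvDvbOuter (pvBuildIndex columns) elec_years

-- ===== PRECONDITION & SPEC =====
def Spec_detect_vote_columns (columns : List String) (cycle_year : Int) (out : List String × List String × String) : Prop := out = detect_vote_columns_alt columns cycle_year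
instance (columns : List String) (cycle_year : Int) (out : List String × List String × String) : Decidable (Spec_detect_vote_columns columns cycle_year out) := by unfold Spec_detect_vote_columns; infer_instance

-- ===== CLAIM (what is proved, stated in full; the proofs are below) =====
def Claim_equal_detect_vote_columns : Prop := ∀ (columns : List String) (cycle_year : Int), Dom_detect_vote_columns columns cycle_year → Spec_detect_vote_columns columns cycle_year (detect_vote_columns columns cycle_year)

-- ===== LEMMAS AND PROOFS =====

-- A's find_vote_columns with singleton year and office lists is just the filter
lemma fv_single (columns : List String) (yr office party : String) :
    find_vote_columns columns [yr] [office] party =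
      columns.filter (fun c => PySem.Str.startswith (PySem.Str.upper c)
        (PySem.Str.upper (PySem.Str.join "" ["G", yr, office, party]))) := by
  simp only [find_vote_columns, pvFvOuter, pvFvInner]
  split <;> rename_i h <;> simp_all

-- B's index bucket at any key is the filter over columns whose parse yields that key
lemma bucket_eq (columns : List String) (key : String × String × String) :
    (pvBuildIndex columns).getD key [] =
      columns.filter (fun c => pvParseKey c == some key) := by
  simp only [pvBuildIndex]
  rw [PySem.Dict.getD_foldl_modify_append]
  simp only [PySem.Dict.getD_empty, List.nil_append]
  induction columns with
  | nil => simp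
  | cons c cs ih =>
      cases h : pvParseKey c with
      | none => simp [h, ih]
      | some k =>
          simp [h, List.filter_cons]
          split <;> simp_all


-- slice/take-drop normalizers for the concrete bounds B uses
lemma pv_slice_eq_iff (s t : String) (a b : Option Int) :
    (PySem.Str.slice s a b = t) ↔ PySem.List.slice s.toList a b = t.toList := by
  rw [← String.toList_inj]; simp

lemma pv_slice36 (u : List Char) : PySem.List.slice u (some 3) (some 6) = (u.drop 3).take 3 := by
  exact_mod_cast PySem.List.slice_natCast u 3 6
lemma pv_slice13 (u : List Char) : PySem.List.slice u (some 1) (some 3) = (u.drop 1).take 2 := by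
  exact_mod_cast PySem.List.slice_natCast u 1 3
lemma pv_slice67 (u : List Char) : PySem.List.slice u (some 6) (some 7) = (u.drop 6).take 1 := by
  exact_mod_cast PySem.List.slice_natCast u 6 7
lemma pv_slice37 (u : List Char) : PySem.List.slice u (some 3) (some 7) = (u.drop 3).take 4 := by
  exact_mod_cast PySem.List.slice_natCast u 3 7
lemma pv_slice78 (u : List Char) : PySem.List.slice u (some 7) (some 8) = (u.drop 7).take 1 := by
  exact_mod_cast PySem.List.slice_natCast u 7 8
lemma pv_slice01 (u : List Char) : PySem.List.slice u none (some 1) = u.take 1 := by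
  have h : ((1 : Int)) = ((1 : Nat) : Int) := rfl
  rw [h, PySem.List.slice_to_natCast]

-- a 7-/8-character prefix, spelled as the take/drop pieces B compares
lemma pv_take_drop7 (u : List Char) (a b c d e f g : Char) :
    (u.take 1 = [a] ∧ (u.drop 3).take 3 = [d,e,f] ∧ (u.drop 1).take 2 = [b,c] ∧ (u.drop 6).take 1 = [g]) ↔
      [a,b,c,d,e,f,g] <+: u := by
  match u with
  | [] | [x1] | [x1,x2] | [x1,x2,x3] | [x1,x2,x3,x4] | [x1,x2,x3,x4,x5] | [x1,x2,x3,x4,x5,x6] => simp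
  | x1::x2::x3::x4::x5::x6::x7::rest =>
      simp [List.cons_prefix_cons]
      tauto

lemma pv_take_drop8 (u : List Char) (a b c d e f g h : Char) :
    (u.take 1 = [a] ∧ (u.drop 3).take 4 = [d,e,f,g] ∧ (u.drop 1).take 2 = [b,c] ∧ (u.drop 7).take 1 = [h]) ↔
      [a,b,c,d,e,f,g,h] <+: u := by
  match u with
  | [] | [x1] | [x1,x2] | [x1,x2,x3] | [x1,x2,x3,x4] | [x1,x2,x3,x4,x5] | [x1,x2,x3,x4,x5,x6] | [x1,x2,x3,x4,x5,x6,x7] => simp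
  | x1::x2::x3::x4::x5::x6::x7::x8::rest =>
      simp [List.cons_prefix_cons]
      tauto

lemma pv_parse_iff_USH (col : String) (y1 y2 pc : Char) :
    (pvParseKey col = some (String.ofList [y1,y2], "USH", String.ofList [pc])) ↔
      ((PySem.Chars.upper col.toList).take 1 = ['G'] ∧
       ((PySem.Chars.upper col.toList).drop 3).take 3 = ['U','S','H'] ∧
       ((PySem.Chars.upper col.toList).drop 1).take 2 = [y1,y2] ∧
       ((PySem.Chars.upper col.toList).drop 6).take 1 = [pc]) := by
  simp only [pvParseKey, pvParseOffice, pvOffices,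
    show (3 + PySem.Str.len "USH" : Int) = 6 from by decide,
    show (3 + PySem.Str.len "GOV" : Int) = 6 from by decide,
    show (3 + PySem.Str.len "USS" : Int) = 6 from by decide,
    show (3 + PySem.Str.len "PRES" : Int) = 7 from by decide,
    show ((6 : Int) + 1) = 7 from by decide, show ((7 : Int) + 1) = 8 from by decide]
  generalize hu : PySem.Str.upper col = cu
  have hcu : cu.toList = PySem.Chars.upper col.toList := by rw [← hu]; simp
  rw [← hcu]
  split_ifs <;>
    simp_all [pv_slice_eq_iff, Option.some.injEq, Prod.mk.injEq,
      pv_slice36, pv_slice13, pv_slice67, pv_slice37, pv_slice78, pv_slice01, String.toList_ofList,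
      show ("G" : String).toList = ['G'] from rfl,
      show ("USH" : String).toList = ['U','S','H'] from rfl,
      show ("GOV" : String).toList = ['G','O','V'] from rfl,
      show ("USS" : String).toList = ['U','S','S'] from rfl,
      show ("PRES" : String).toList = ['P','R','E','S'] from rfl]

lemma pv_parse_iff_GOV (col : String) (y1 y2 pc : Char) :
    (pvParseKey col = some (String.ofList [y1,y2], "GOV", String.ofList [pc])) ↔
      ((PySem.Chars.upper col.toList).take 1 = ['G'] ∧
       ((PySem.Chars.upper col.toList).drop 3).take 3 = ['G','O','V'] ∧
       ((PySem.Chars.upper col.toList).drop 1).take 2 = [y1,y2] ∧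
       ((PySem.Chars.upper col.toList).drop 6).take 1 = [pc]) := by
  simp only [pvParseKey, pvParseOffice, pvOffices,
    show (3 + PySem.Str.len "USH" : Int) = 6 from by decide,
    show (3 + PySem.Str.len "GOV" : Int) = 6 from by decide,
    show (3 + PySem.Str.len "USS" : Int) = 6 from by decide,
    show (3 + PySem.Str.len "PRES" : Int) = 7 from by decide,
    show ((6 : Int) + 1) = 7 from by decide, show ((7 : Int) + 1) = 8 from by decide]
  generalize hu : PySem.Str.upper col = cu
  have hcu : cu.toList = PySem.Chars.upper col.toList := by rw [← hu]; simp
  rw [← hcu]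
  split_ifs <;>
    simp_all [pv_slice_eq_iff, Option.some.injEq, Prod.mk.injEq,
      pv_slice36, pv_slice13, pv_slice67, pv_slice37, pv_slice78, pv_slice01, String.toList_ofList,
      show ("G" : String).toList = ['G'] from rfl,
      show ("USH" : String).toList = ['U','S','H'] from rfl,
      show ("GOV" : String).toList = ['G','O','V'] from rfl,
      show ("USS" : String).toList = ['U','S','S'] from rfl,
      show ("PRES" : String).toList = ['P','R','E','S'] from rfl]

lemma pv_parse_iff_USS (col : String) (y1 y2 pc : Char) :
    (pvParseKey col = some (String.ofList [y1,y2], "USS", String.ofList [pc])) ↔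
      ((PySem.Chars.upper col.toList).take 1 = ['G'] ∧
       ((PySem.Chars.upper col.toList).drop 3).take 3 = ['U','S','S'] ∧
       ((PySem.Chars.upper col.toList).drop 1).take 2 = [y1,y2] ∧
       ((PySem.Chars.upper col.toList).drop 6).take 1 = [pc]) := by
  simp only [pvParseKey, pvParseOffice, pvOffices,
    show (3 + PySem.Str.len "USH" : Int) = 6 from by decide,
    show (3 + PySem.Str.len "GOV" : Int) = 6 from by decide,
    show (3 + PySem.Str.len "USS" : Int) = 6 from by decide,
    show (3 + PySem.Str.len "PRES" : Int) = 7 from by decide,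
    show ((6 : Int) + 1) = 7 from by decide, show ((7 : Int) + 1) = 8 from by decide]
  generalize hu : PySem.Str.upper col = cu
  have hcu : cu.toList = PySem.Chars.upper col.toList := by rw [← hu]; simp
  rw [← hcu]
  split_ifs <;>
    simp_all [pv_slice_eq_iff, Option.some.injEq, Prod.mk.injEq,
      pv_slice36, pv_slice13, pv_slice67, pv_slice37, pv_slice78, pv_slice01, String.toList_ofList,
      show ("G" : String).toList = ['G'] from rfl,
      show ("USH" : String).toList = ['U','S','H'] from rfl,
      show ("GOV" : String).toList = ['G','O','V'] from rfl,
      show ("USS" : String).toList = ['U','S','S'] from rfl,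
      show ("PRES" : String).toList = ['P','R','E','S'] from rfl]

lemma pv_parse_iff_PRES (col : String) (y1 y2 pc : Char) :
    (pvParseKey col = some (String.ofList [y1,y2], "PRES", String.ofList [pc])) ↔
      ((PySem.Chars.upper col.toList).take 1 = ['G'] ∧
       ((PySem.Chars.upper col.toList).drop 3).take 4 = ['P','R','E','S'] ∧
       ((PySem.Chars.upper col.toList).drop 1).take 2 = [y1,y2] ∧
       ((PySem.Chars.upper col.toList).drop 7).take 1 = [pc]) := by
  simp only [pvParseKey, pvParseOffice, pvOffices,
    show (3 + PySem.Str.len "USH" : Int) = 6 from by decide,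
    show (3 + PySem.Str.len "GOV" : Int) = 6 from by decide,
    show (3 + PySem.Str.len "USS" : Int) = 6 from by decide,
    show (3 + PySem.Str.len "PRES" : Int) = 7 from by decide,
    show ((6 : Int) + 1) = 7 from by decide, show ((7 : Int) + 1) = 8 from by decide]
  generalize hu : PySem.Str.upper col = cu
  have hcu : cu.toList = PySem.Chars.upper col.toList := by rw [← hu]; simp
  rw [← hcu]
  split_ifs <;>
    simp_all [pv_slice_eq_iff, Option.some.injEq, Prod.mk.injEq,
      pv_slice36, pv_slice13, pv_slice67, pv_slice37, pv_slice78, pv_slice01, String.toList_ofList,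
      show ("G" : String).toList = ['G'] from rfl,
      show ("USH" : String).toList = ['U','S','H'] from rfl,
      show ("GOV" : String).toList = ['G','O','V'] from rfl,
      show ("USS" : String).toList = ['U','S','S'] from rfl,
      show ("PRES" : String).toList = ['P','R','E','S'] from rfl]
  all_goals
    intro hp _
    have h3' := congrArg (List.take 3) hp
    simp [List.take_take] at h3'
    simp_all

lemma pv_key_pred_USH (c : String) (y1 y2 pc : Char) :
    (pvParseKey c == some (String.ofList [y1,y2], "USH", String.ofList [pc])) =
      PySem.Chars.startswith (PySem.Chars.upper c.toList) ['G',y1,y2,'U','S','H',pc] := by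
  rw [Bool.eq_iff_iff, beq_iff_eq, PySem.Chars.startswith_iff, pv_parse_iff_USH, ← pv_take_drop7]

lemma pv_lookup_USH (columns : List String) (yr party : String) (y1 y2 pc : Char)
    (hyr : yr = String.ofList [y1,y2]) (hp : party = String.ofList [pc])
    (hup : (PySem.Str.upper (PySem.Str.join "" ["G", yr, "USH", party])).toList = ['G',y1,y2,'U','S','H',pc]) :
    (pvBuildIndex columns).getD (yr, "USH", party) [] = find_vote_columns columns [yr] ["USH"] party := by
  subst hyr hp
  rw [bucket_eq, fv_single]
  apply List.filter_congr
  intro c _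
  rw [pv_key_pred_USH c y1 y2 pc]
  simp [hup]

lemma pv_key_pred_GOV (c : String) (y1 y2 pc : Char) :
    (pvParseKey c == some (String.ofList [y1,y2], "GOV", String.ofList [pc])) =
      PySem.Chars.startswith (PySem.Chars.upper c.toList) ['G',y1,y2,'G','O','V',pc] := by
  rw [Bool.eq_iff_iff, beq_iff_eq, PySem.Chars.startswith_iff, pv_parse_iff_GOV, ← pv_take_drop7]

lemma pv_lookup_GOV (columns : List String) (yr party : String) (y1 y2 pc : Char)
    (hyr : yr = String.ofList [y1,y2]) (hp : party = String.ofList [pc])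
    (hup : (PySem.Str.upper (PySem.Str.join "" ["G", yr, "GOV", party])).toList = ['G',y1,y2,'G','O','V',pc]) :
    (pvBuildIndex columns).getD (yr, "GOV", party) [] = find_vote_columns columns [yr] ["GOV"] party := by
  subst hyr hp
  rw [bucket_eq, fv_single]
  apply List.filter_congr
  intro c _
  rw [pv_key_pred_GOV c y1 y2 pc]
  simp [hup]

lemma pv_key_pred_USS (c : String) (y1 y2 pc : Char) :
    (pvParseKey c == some (String.ofList [y1,y2], "USS", String.ofList [pc])) =
      PySem.Chars.startswith (PySem.Chars.upper c.toList) ['G',y1,y2,'U','S','S',pc] := by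
  rw [Bool.eq_iff_iff, beq_iff_eq, PySem.Chars.startswith_iff, pv_parse_iff_USS, ← pv_take_drop7]

lemma pv_lookup_USS (columns : List String) (yr party : String) (y1 y2 pc : Char)
    (hyr : yr = String.ofList [y1,y2]) (hp : party = String.ofList [pc])
    (hup : (PySem.Str.upper (PySem.Str.join "" ["G", yr, "USS", party])).toList = ['G',y1,y2,'U','S','S',pc]) :
    (pvBuildIndex columns).getD (yr, "USS", party) [] = find_vote_columns columns [yr] ["USS"] party := by
  subst hyr hp
  rw [bucket_eq, fv_single]
  apply List.filter_congr
  intro c _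
  rw [pv_key_pred_USS c y1 y2 pc]
  simp [hup]

lemma pv_key_pred_PRES (c : String) (y1 y2 pc : Char) :
    (pvParseKey c == some (String.ofList [y1,y2], "PRES", String.ofList [pc])) =
      PySem.Chars.startswith (PySem.Chars.upper c.toList) ['G',y1,y2,'P','R','E','S',pc] := by
  rw [Bool.eq_iff_iff, beq_iff_eq, PySem.Chars.startswith_iff, pv_parse_iff_PRES, ← pv_take_drop8]

lemma pv_lookup_PRES (columns : List String) (yr party : String) (y1 y2 pc : Char)
    (hyr : yr = String.ofList [y1,y2]) (hp : party = String.ofList [pc])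
    (hup : (PySem.Str.upper (PySem.Str.join "" ["G", yr, "PRES", party])).toList = ['G',y1,y2,'P','R','E','S',pc]) :
    (pvBuildIndex columns).getD (yr, "PRES", party) [] = find_vote_columns columns [yr] ["PRES"] party := by
  subst hyr hp
  rw [bucket_eq, fv_single]
  apply List.filter_congr
  intro c _
  rw [pv_key_pred_PRES c y1 y2 pc]
  simp [hup]

theorem detect_vote_columns_spec : Claim_equal_detect_vote_columns := by
  intro columns cycle_year _
  unfold Spec_detect_vote_columns
  simp only [detect_vote_columns, detect_vote_columns_alt]
  by_cases h12 : cycle_year = 2012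
  · subst h12
    rw [show CYCLE_TO_ELEC_YEARS.getD 2012 ["22"] = ["12","14","16"] from rfl]
    have h12USHD := pv_lookup_USH columns "12" "D" '1' '2' 'D' rfl rfl (by decide)
    have h12USHR := pv_lookup_USH columns "12" "R" '1' '2' 'R' rfl rfl (by decide)
    have h12GOVD := pv_lookup_GOV columns "12" "D" '1' '2' 'D' rfl rfl (by decide)
    have h12GOVR := pv_lookup_GOV columns "12" "R" '1' '2' 'R' rfl rfl (by decide)
    have h12USSD := pv_lookup_USS columns "12" "D" '1' '2' 'D' rfl rfl (by decide)
    have h12USSR := pv_lookup_USS columns "12" "R" '1' '2' 'R' rfl rfl (by decide)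
    have h12PRESD := pv_lookup_PRES columns "12" "D" '1' '2' 'D' rfl rfl (by decide)
    have h12PRESR := pv_lookup_PRES columns "12" "R" '1' '2' 'R' rfl rfl (by decide)
    have h14USHD := pv_lookup_USH columns "14" "D" '1' '4' 'D' rfl rfl (by decide)
    have h14USHR := pv_lookup_USH columns "14" "R" '1' '4' 'R' rfl rfl (by decide)
    have h14GOVD := pv_lookup_GOV columns "14" "D" '1' '4' 'D' rfl rfl (by decide)
    have h14GOVR := pv_lookup_GOV columns "14" "R" '1' '4' 'R' rfl rfl (by decide)
    have h14USSD := pv_lookup_USS columns "14" "D" '1' '4' 'D' rfl rfl (by decide)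
    have h14USSR := pv_lookup_USS columns "14" "R" '1' '4' 'R' rfl rfl (by decide)
    have h14PRESD := pv_lookup_PRES columns "14" "D" '1' '4' 'D' rfl rfl (by decide)
    have h14PRESR := pv_lookup_PRES columns "14" "R" '1' '4' 'R' rfl rfl (by decide)
    have h16USHD := pv_lookup_USH columns "16" "D" '1' '6' 'D' rfl rfl (by decide)
    have h16USHR := pv_lookup_USH columns "16" "R" '1' '6' 'R' rfl rfl (by decide)
    have h16GOVD := pv_lookup_GOV columns "16" "D" '1' '6' 'D' rfl rfl (by decide)
    have h16GOVR := pv_lookup_GOV columns "16" "R" '1' '6' 'R' rfl rfl (by decide)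
    have h16USSD := pv_lookup_USS columns "16" "D" '1' '6' 'D' rfl rfl (by decide)
    have h16USSR := pv_lookup_USS columns "16" "R" '1' '6' 'R' rfl rfl (by decide)
    have h16PRESD := pv_lookup_PRES columns "16" "D" '1' '6' 'D' rfl rfl (by decide)
    have h16PRESR := pv_lookup_PRES columns "16" "R" '1' '6' 'R' rfl rfl (by decide)
    simp only [pvDvOuter, pvDvInner, pvDvbOuter, pvDvbInner, pvOffices, h12USHD, h12USHR, h12GOVD, h12GOVR, h12USSD, h12USSR, h12PRESD, h12PRESR, h14USHD, h14USHR, h14GOVD, h14GOVR, h14USSD, h14USSR, h14PRESD, h14PRESR, h16USHD, h16USHR, h16GOVD, h16GOVR, h16USSD, h16USSR, h16PRESD, h16PRESR]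
  · by_cases h22 : cycle_year = 2022
    · subst h22
      rw [show CYCLE_TO_ELEC_YEARS.getD 2022 ["22"] = ["22","20"] from rfl]
      have h22USHD := pv_lookup_USH columns "22" "D" '2' '2' 'D' rfl rfl (by decide)
      have h22USHR := pv_lookup_USH columns "22" "R" '2' '2' 'R' rfl rfl (by decide)
      have h22GOVD := pv_lookup_GOV columns "22" "D" '2' '2' 'D' rfl rfl (by decide)
      have h22GOVR := pv_lookup_GOV columns "22" "R" '2' '2' 'R' rfl rfl (by decide)
      have h22USSD := pv_lookup_USS columns "22" "D" '2' '2' 'D' rfl rfl (by decide)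
      have h22USSR := pv_lookup_USS columns "22" "R" '2' '2' 'R' rfl rfl (by decide)
      have h22PRESD := pv_lookup_PRES columns "22" "D" '2' '2' 'D' rfl rfl (by decide)
      have h22PRESR := pv_lookup_PRES columns "22" "R" '2' '2' 'R' rfl rfl (by decide)
      have h20USHD := pv_lookup_USH columns "20" "D" '2' '0' 'D' rfl rfl (by decide)
      have h20USHR := pv_lookup_USH columns "20" "R" '2' '0' 'R' rfl rfl (by decide)
      have h20GOVD := pv_lookup_GOV columns "20" "D" '2' '0' 'D' rfl rfl (by decide)
      have h20GOVR := pv_lookup_GOV columns "20" "R" '2' '0' 'R' rfl rfl (by decide)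
      have h20USSD := pv_lookup_USS columns "20" "D" '2' '0' 'D' rfl rfl (by decide)
      have h20USSR := pv_lookup_USS columns "20" "R" '2' '0' 'R' rfl rfl (by decide)
      have h20PRESD := pv_lookup_PRES columns "20" "D" '2' '0' 'D' rfl rfl (by decide)
      have h20PRESR := pv_lookup_PRES columns "20" "R" '2' '0' 'R' rfl rfl (by decide)
      simp only [pvDvOuter, pvDvInner, pvDvbOuter, pvDvbInner, pvOffices, h22USHD, h22USHR, h22GOVD, h22GOVR, h22USSD, h22USSR, h22PRESD, h22PRESR, h20USHD, h20USHR, h20GOVD, h20GOVR, h20USSD, h20USSR, h20PRESD, h20PRESR]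
    · rw [show CYCLE_TO_ELEC_YEARS.getD cycle_year ["22"] = ["22"] from by
        simp [show CYCLE_TO_ELEC_YEARS = PySem.Dict.mk [((2012 : Int), ["12","14","16"]), (2022, ["22","20"])] from rfl,
          PySem.Dict.getD_eq_get?_getD,          show ¬ (2012 : Int) = cycle_year from fun h => h12 h.symm,
          show ¬ (2022 : Int) = cycle_year from fun h => h22 h.symm, PySem.Dict.get?]]
      have h22USHD := pv_lookup_USH columns "22" "D" '2' '2' 'D' rfl rfl (by decide)
      have h22USHR := pv_lookup_USH columns "22" "R" '2' '2' 'R' rfl rfl (by decide)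
      have h22GOVD := pv_lookup_GOV columns "22" "D" '2' '2' 'D' rfl rfl (by decide)
      have h22GOVR := pv_lookup_GOV columns "22" "R" '2' '2' 'R' rfl rfl (by decide)
      have h22USSD := pv_lookup_USS columns "22" "D" '2' '2' 'D' rfl rfl (by decide)
      have h22USSR := pv_lookup_USS columns "22" "R" '2' '2' 'R' rfl rfl (by decide)
      have h22PRESD := pv_lookup_PRES columns "22" "D" '2' '2' 'D' rfl rfl (by decide)
      have h22PRESR := pv_lookup_PRES columns "22" "R" '2' '2' 'R' rfl rfl (by decide)
      simp only [pvDvOuter, pvDvInner, pvDvbOuter, pvDvbInner, pvOffices, h22USHD, h22USHR, h22GOVD, h22GOVR, h22USSD, h22USSR, h22PRESD, h22PRESR]
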